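-- pv_equiv track=rewrite | github.com/rishikeshvarma9854/Document_summarizer | document_summarizer/src/utils/data_loader.py | sample_by_domain
-- ===== SOURCE A (Python) =====
-- from typing import List, Dict, Optional, Tuple, Iterator
--
-- def sample_by_domain(documents: List[str], summaries: Optional[List[str]] = None,
--                     domain_keywords: Dict[str, List[str]] = None) -> Dict[str, Tuple[List[str], Optional[List[str]]]]:
--     """Sample documents by domain based on keywords."""
--     if domain_keywords is None:
--         domain_keywords = {
--             'news': ['news', 'report', 'journalist', 'breaking', 'update'],
--             'science': ['research', 'study', 'experiment', 'analysis', 'findings'],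
--             'business': ['company', 'market', 'financial', 'revenue', 'profit'],
--             'technology': ['software', 'algorithm', 'computer', 'digital', 'tech']
--         }
--
--     domain_samples = {domain: ([], []) for domain in domain_keywords}
--
--     for i, doc in enumerate(documents):
--         doc_lower = doc.lower()
--
--         for domain, keywords in domain_keywords.items():
--             if any(keyword in doc_lower for keyword in keywords):
--                 domain_samples[domain][0].append(doc)
--                 if summaries and i < len(summaries):
--                     domain_samples[domain][1].append(summaries[i])
--                 break
--
--     # Convert to proper format
--     result = {}
--     for domain, (docs, summs) in domain_samples.items():
--         result[domain] = (docs, summs if summaries else None)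
--
--     return result
-- ===== SOURCE B (Python) =====
-- from typing import List, Dict, Optional, Tuple
--
-- def sample_by_domain(documents: List[str], summaries: Optional[List[str]] = None,
--                     domain_keywords: Dict[str, List[str]] = None) -> Dict[str, Tuple[List[str], Optional[List[str]]]]:
--     """Domain-major sieve: for each domain in order, claim the matching documents
--     out of a shrinking pool of still-unclaimed documents.  A document ends up in
--     the first domain that matches it, exactly as in the document-major version,
--     because earlier domains remove their matches from the pool first."""
--     if domain_keywords is None:
--         domain_keywords = {
--             'news': ['news', 'report', 'journalist', 'breaking', 'update'],
--             'science': ['research', 'study', 'experiment', 'analysis', 'findings'],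
--             'business': ['company', 'market', 'financial', 'revenue', 'profit'],
--             'technology': ['software', 'algorithm', 'computer', 'digital', 'tech']
--         }
--
--     pool = [(i, doc, doc.lower()) for i, doc in enumerate(documents)]
--     result = {}
--     for domain, keywords in domain_keywords.items():
--         matched = [t for t in pool if any(k in t[2] for k in keywords)]
--         pool = [t for t in pool if not any(k in t[2] for k in keywords)]
--         docs = [t[1] for t in matched]
--         if summaries:
--             summs = [summaries[t[0]] for t in matched if t[0] < len(summaries)]
--             result[domain] = (docs, summs)
--         else:
--             result[domain] = (docs, None)
--     return result
-- ===== Notes on version B (the rewrite author's own statement) =====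
-- stated objective: alternative
-- what changed: A is document-major: one pass over documents, each document probing domains in order with break and appending into per-domain dict buckets; B is domain-major: it iterates over domains and, for each, sieves the matching documents out of a shrinking pool of still-unclaimed (index, doc, lowered) triples, which is correct because a document reaches domain j's sieve iff no earlier domain matched it.
import Mathlib
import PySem

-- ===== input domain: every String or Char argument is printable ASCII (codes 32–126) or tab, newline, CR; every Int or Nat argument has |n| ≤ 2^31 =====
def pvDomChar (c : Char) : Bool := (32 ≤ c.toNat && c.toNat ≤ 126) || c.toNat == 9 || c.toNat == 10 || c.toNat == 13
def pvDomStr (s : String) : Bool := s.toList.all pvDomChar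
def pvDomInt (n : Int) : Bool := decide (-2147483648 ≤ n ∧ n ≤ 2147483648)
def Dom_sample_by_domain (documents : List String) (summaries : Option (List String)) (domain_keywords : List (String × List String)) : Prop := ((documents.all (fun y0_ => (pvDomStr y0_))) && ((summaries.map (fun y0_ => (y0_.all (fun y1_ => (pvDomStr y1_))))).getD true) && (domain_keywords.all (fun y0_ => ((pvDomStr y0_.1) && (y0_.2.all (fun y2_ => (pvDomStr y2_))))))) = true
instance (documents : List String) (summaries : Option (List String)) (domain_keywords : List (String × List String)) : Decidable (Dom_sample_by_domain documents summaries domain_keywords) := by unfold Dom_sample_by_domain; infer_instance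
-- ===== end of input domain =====

-- B is a domain-major sieve (each domain claims its matches out of a shrinking pool of unclaimed documents) instead of A's document-major pass with an inner break; alternative decomposition, same cost.


-- ===== PORT A =====
-- Python truthiness of the `summaries` argument (`if summaries`): None and [] are falsy.
def pvTruthy (summaries : Option (List String)) : Bool :=
  match summaries with
  | some (_ :: _) => true
  | _ => false

-- A's inner `for domain, keywords in domain_keywords.items(): … break` loop for one document.
def pvAInner (ds : PySem.Dict String (List String × List String)) (items : List (String × List String)) (i : Int) (doc : String) (low : String) (summaries : Option (List String)) : PySem.Dict String (List String × List String) :=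
  match items with
  | [] => ds
  | (domain, keywords) :: rest =>
    if keywords.any (fun k => PySem.Str.isIn k low) then
      let ds1 := ds.modify domain ([], []) (fun p => (p.1 ++ [doc], p.2))
      if pvTruthy summaries && decide (i < ((summaries.getD []).length : Int)) then
        ds1.modify domain ([], []) (fun p => (p.1, p.2 ++ [PySem.List.pyGetD (summaries.getD []) i ""]))
      else ds1
    else pvAInner ds rest i doc low summaries

def sample_by_domain (documents : List String) (summaries : Option (List String)) (domain_keywords : List (String × List String)) : List (String × List String × Option (List String)) :=
  let dk := PySem.Dict.ofList domain_keywords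
  let domain_samples := dk.keys.foldl (fun d domain => d.insert domain ([], [])) PySem.Dict.empty
  let final := (PySem.List.enumerate documents).foldl
    (fun ds p => pvAInner ds dk.items p.1 p.2 (PySem.Str.lower p.2) summaries) domain_samples
  final.items.map (fun q => (q.1, q.2.1, if pvTruthy summaries then some q.2.2 else none))

-- ===== PORT B =====
-- `any(k in t[2] for k in keywords)`
def pvMatch (keywords : List String) (low : String) : Bool :=
  keywords.any (fun k => PySem.Str.isIn k low)

-- B's `for domain, keywords in domain_keywords.items():` sieve loop: each domain claims its
-- matches out of the pool of still-unclaimed (index, doc, lowered-doc) triples.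
def pvSieve (items : List (String × List String)) (pool : List (Int × String × String)) (summaries : Option (List String)) : List (String × List String × Option (List String)) :=
  match items with
  | [] => []
  | (domain, keywords) :: rest =>
    let matched := pool.filter (fun t => pvMatch keywords t.2.2)
    let pool' := pool.filter (fun t => !pvMatch keywords t.2.2)
    let docs := matched.map (fun t => t.2.1)
    let entry :=
      if pvTruthy summaries then
        some ((matched.filter (fun t => decide (t.1 < ((summaries.getD []).length : Int)))).map
          (fun t => PySem.List.pyGetD (summaries.getD []) t.1 ""))
      else none
    (domain, docs, entry) :: pvSieve rest pool' summaries

def sample_by_domain_alt (documents : List String) (summaries : Option (List String)) (domain_keywords : List (String × List String)) : List (String × List String × Option (List String)) :=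
  let dk := PySem.Dict.ofList domain_keywords
  let pool := (PySem.List.enumerate documents).map (fun p => (p.1, p.2, PySem.Str.lower p.2))
  pvSieve dk.items pool summaries

-- ===== PRECONDITION & SPEC =====
def Spec_sample_by_domain (documents : List String) (summaries : Option (List String)) (domain_keywords : List (String × List String)) (out : List (String × List String × Option (List String))) : Prop := out = sample_by_domain_alt documents summaries domain_keywords
instance (documents : List String) (summaries : Option (List String)) (domain_keywords : List (String × List String)) (out : List (String × List String × Option (List String))) : Decidable (Spec_sample_by_domain documents summaries domain_keywords out) := by unfold Spec_sample_by_domain; infer_instance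

-- ===== CLAIM (what is proved, stated in full; the proofs are below) =====
def Claim_equal_sample_by_domain : Prop := ∀ (documents : List String) (summaries : Option (List String)) (domain_keywords : List (String × List String)), Dom_sample_by_domain documents summaries domain_keywords → Spec_sample_by_domain documents summaries domain_keywords (sample_by_domain documents summaries domain_keywords)

-- ===== LEMMAS AND PROOFS =====

-- First domain one of whose keywords occurs in the lowered document (proof-side description of both programs' assignment rule).
def pvClassify (items : List (String × List String)) (low : String) : Option String :=
  match items with
  | [] => none
  | (domain, keywords) :: rest =>
    if keywords.any (fun k => PySem.Str.isIn k low) then some domain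
    else pvClassify rest low

-- The summary-append condition of A for index i.
def pvC (summaries : Option (List String)) (i : Int) : Bool :=
  pvTruthy summaries && decide (i < (((summaries.getD []).length : Int)))

theorem pvClassify_mem (items : List (String × List String)) (low : String) (x : String) (h : pvClassify items low = some x) : x ∈ items.map Prod.fst := by
  induction items with
  | nil => simp [pvClassify] at h
  | cons q rest ih =>
    obtain ⟨d, kws⟩ := q
    by_cases hm : (kws.any fun k => PySem.Str.isIn k low) = true
    · simp only [pvClassify, hm, if_true, Option.some.injEq] at h
      simp [h]
    · rw [Bool.not_eq_true] at hm
      simp only [pvClassify, hm, Bool.false_eq_true, if_false] at h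
      exact List.mem_cons_of_mem _ (ih h)

-- modify at a present key preserves the key list
theorem pvKeysModify {d : PySem.Dict String (List String × List String)} {k : String} (d0 : List String × List String) (f : List String × List String → List String × List String) (h : d.contains k = true) : (d.modify k d0 f).keys = d.keys := by
  rw [PySem.Dict.keys_modify, PySem.Dict.keys_insert_of_contains _ _ h]

theorem pvAInner_keys (ds : PySem.Dict String (List String × List String)) (items : List (String × List String)) (i : Int) (doc low : String) (s : Option (List String))
    (h : ∀ q ∈ items, ds.contains q.1 = true) :
    (pvAInner ds items i doc low s).keys = ds.keys := by
  induction items generalizing ds with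
  | nil => rfl
  | cons q rest ih =>
    obtain ⟨domain, keywords⟩ := q
    have hd : ds.contains domain = true := h (domain, keywords) (by simp)
    have h1 : (ds.modify domain ([], []) (fun p => (p.1 ++ [doc], p.2))).contains domain = true := by
      rw [PySem.Dict.contains_modify]; simp
    by_cases hm : (keywords.any fun k => PySem.Str.isIn k low) = true
    · simp only [pvAInner, hm, if_true]
      split_ifs with hc
      · rw [pvKeysModify _ _ h1, pvKeysModify _ _ hd]
      · rw [pvKeysModify _ _ hd]
    · rw [Bool.not_eq_true] at hm
      simp only [pvAInner, hm, Bool.false_eq_true, if_false]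
      exact ih ds (fun q hq => h q (List.mem_cons_of_mem _ hq))

theorem pvAInner_getD (ds : PySem.Dict String (List String × List String)) (items : List (String × List String)) (i : Int) (doc low : String) (s : Option (List String)) (x : String) :
    (pvAInner ds items i doc low s).getD x ([], []) =
      (if pvClassify items low = some x
       then ((ds.getD x ([], [])).1 ++ [doc],
             if pvC s i then (ds.getD x ([], [])).2 ++ [PySem.List.pyGetD (s.getD []) i ""] else (ds.getD x ([], [])).2)
       else ds.getD x ([], [])) := by
  induction items generalizing ds with
  | nil => simp [pvAInner, pvClassify]
  | cons q rest ih =>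
    obtain ⟨domain, keywords⟩ := q
    by_cases hm : (keywords.any fun k => PySem.Str.isIn k low) = true
    · simp only [pvAInner, pvClassify, hm, if_true, pvC]
      by_cases hx : x = domain
      · subst hx
        rw [if_pos rfl]
        split_ifs with hc
        · rw [PySem.Dict.getD_modify_self, PySem.Dict.getD_modify_self]
        · rw [PySem.Dict.getD_modify_self]
      · have hxn : x ≠ domain := hx
        have hsome : ¬ ((some domain : Option String) = some x) := by
          simp only [Option.some.injEq]
          exact fun h => hxn (h.symm)
        simp only [hsome, if_false]
        split_ifs with hc
        · rw [PySem.Dict.getD_modify_of_ne _ _ _ hxn, PySem.Dict.getD_modify_of_ne _ _ _ hxn]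
        · rw [PySem.Dict.getD_modify_of_ne _ _ _ hxn]
    · rw [Bool.not_eq_true] at hm
      simp only [pvAInner, pvClassify, hm, Bool.false_eq_true, if_false]
      exact ih ds

theorem pvFold_keys (items : List (String × List String)) (s : Option (List String)) (L : List (Int × String)) (ds : PySem.Dict String (List String × List String))
    (h : ∀ q ∈ items, ds.contains q.1 = true) :
    (L.foldl (fun ds p => pvAInner ds items p.1 p.2 (PySem.Str.lower p.2) s) ds).keys = ds.keys := by
  induction L generalizing ds with
  | nil => rfl
  | cons p L ih =>
    have hk := pvAInner_keys ds items p.1 p.2 (PySem.Str.lower p.2) s h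
    have h' : ∀ q ∈ items, (pvAInner ds items p.1 p.2 (PySem.Str.lower p.2) s).contains q.1 = true := by
      intro q hq
      rw [PySem.Dict.contains_iff_mem_keys, hk, ← PySem.Dict.contains_iff_mem_keys]
      exact h q hq
    simp only [List.foldl_cons]
    rw [ih _ h', hk]

theorem pvFold_getD (items : List (String × List String)) (s : Option (List String)) (L : List (Int × String)) (ds : PySem.Dict String (List String × List String)) (x : String) :
    (L.foldl (fun ds p => pvAInner ds items p.1 p.2 (PySem.Str.lower p.2) s) ds).getD x ([], []) =
      ((ds.getD x ([], [])).1 ++ ((L.filter (fun p => pvClassify items (PySem.Str.lower p.2) == some x)).map (·.2)),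
       (ds.getD x ([], [])).2 ++ ((L.filter (fun p => pvClassify items (PySem.Str.lower p.2) == some x && pvC s p.1)).map (fun p => PySem.List.pyGetD (s.getD []) p.1 ""))) := by
  induction L generalizing ds with
  | nil => simp
  | cons p L ih =>
    simp only [List.foldl_cons]
    rw [ih]
    rw [pvAInner_getD]
    by_cases hcl : pvClassify items (PySem.Str.lower p.2) = some x
    · by_cases hc : pvC s p.1 = true
      · simp [hcl, hc, List.append_assoc]
      · simp [hcl, hc, List.append_assoc]
    · simp [hcl]

-- The dict comprehension {domain: v0 for domain in domain_keywords}: items, keys and value everywhere.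
theorem pvInit_items {ν : Type} (dk : PySem.Dict String (List String)) (hnd : dk.keys.Nodup) (v0 : ν) :
    (dk.keys.foldl (fun d domain => d.insert domain v0) PySem.Dict.empty).items = dk.keys.map (fun k => (k, v0)) := by
  have := PySem.Dict.items_foldl_insert_fresh (ν := ν) dk.keys (fun a => a) (fun _ => v0) PySem.Dict.empty
    (by intro a _; exact PySem.Dict.contains_empty a) (by simpa using hnd)
  simpa using this

theorem pvInit_keys {ν : Type} (dk : PySem.Dict String (List String)) (hnd : dk.keys.Nodup) (v0 : ν) :
    (dk.keys.foldl (fun d domain => d.insert domain v0) PySem.Dict.empty).keys = dk.keys := by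
  have hk : ∀ (d : PySem.Dict String ν), d.keys = d.items.map Prod.fst := fun _ => rfl
  rw [hk, pvInit_items dk hnd v0, List.map_map]
  have hid : (Prod.fst ∘ fun k : String => (k, v0)) = id := rfl
  rw [hid, List.map_id]

theorem pvInit_getD {ν : Type} (dk : PySem.Dict String (List String)) (hnd : dk.keys.Nodup) (v0 : ν) (x : String) :
    (dk.keys.foldl (fun d domain => d.insert domain v0) PySem.Dict.empty).getD x v0 = v0 := by
  by_cases hx : x ∈ dk.keys
  · refine PySem.Dict.getD_of_mem_items _ ?_ ?_ v0
    · rw [pvInit_items dk hnd v0]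
      exact List.mem_map_of_mem hx
    · rw [pvInit_keys dk hnd v0]; exact hnd
  · have hcon : (dk.keys.foldl (fun d domain => d.insert domain v0) PySem.Dict.empty).contains x = false := by
      rw [Bool.eq_false_iff]
      intro hc
      rw [PySem.Dict.contains_iff_mem_keys, pvInit_keys dk hnd v0] at hc
      exact hx hc
    exact PySem.Dict.getD_of_not_contains _ _ hcon

-- B's sieve, characterized through pvClassify: entry for domain q.1 collects exactly the pool
-- elements whose first matching domain in `items` is q.1 (requires distinct domain names).
theorem pvSieve_eq (s : Option (List String)) (items : List (String × List String)) (pool : List (Int × String × String)) (hnd : (items.map Prod.fst).Nodup) :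
    pvSieve items pool s = items.map (fun q =>
      (q.1,
       (pool.filter (fun t => pvClassify items t.2.2 == some q.1)).map (fun t => t.2.1),
       if pvTruthy s then
         some (((pool.filter (fun t => pvClassify items t.2.2 == some q.1)).filter (fun t => decide (t.1 < ((s.getD []).length : Int)))).map
           (fun t => PySem.List.pyGetD (s.getD []) t.1 ""))
       else none)) := by
  induction items generalizing pool with
  | nil => rfl
  | cons q rest ih =>
    obtain ⟨d, kws⟩ := q
    simp only [List.map_cons] at hnd ⊢
    have hndrest : (rest.map Prod.fst).Nodup := (List.nodup_cons.mp hnd).2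
    have hdnot : d ∉ rest.map Prod.fst := (List.nodup_cons.mp hnd).1
    have hhead : pool.filter (fun t => pvMatch kws t.2.2) = pool.filter (fun t => pvClassify ((d, kws) :: rest) t.2.2 == some d) := by
      refine List.filter_congr ?_
      intro t _
      by_cases hm : pvMatch kws t.2.2 = true
      · have hm' : (kws.any fun k => PySem.Str.isIn k t.2.2) = true := hm
        have hcl : pvClassify ((d, kws) :: rest) t.2.2 = some d := by
          simp only [pvClassify, hm', if_true]
        rw [hm, hcl]
        simp
      · rw [Bool.not_eq_true] at hm
        have hm' : (kws.any fun k => PySem.Str.isIn k t.2.2) = false := hm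
        have hcl : pvClassify ((d, kws) :: rest) t.2.2 = pvClassify rest t.2.2 := by
          simp only [pvClassify, hm', Bool.false_eq_true, if_false]
        rw [hm, hcl]
        by_cases hr : pvClassify rest t.2.2 = some d
        · exact absurd (pvClassify_mem _ _ _ hr) hdnot
        · simp [hr]
    have htail : ∀ q' ∈ rest,
        (pool.filter (fun t => !pvMatch kws t.2.2)).filter (fun t => pvClassify rest t.2.2 == some q'.1) =
        pool.filter (fun t => pvClassify ((d, kws) :: rest) t.2.2 == some q'.1) := by
      intro q' hq'
      rw [List.filter_filter]
      refine List.filter_congr ?_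
      intro t _
      have hne : q'.1 ≠ d := by
        intro he
        exact hdnot (he ▸ List.mem_map_of_mem (f := Prod.fst) hq')
      by_cases hm : pvMatch kws t.2.2 = true
      · have hm' : (kws.any fun k => PySem.Str.isIn k t.2.2) = true := hm
        have hcl : pvClassify ((d, kws) :: rest) t.2.2 = some d := by
          simp only [pvClassify, hm', if_true]
        rw [hm, hcl]
        simp [hne.symm]
      · rw [Bool.not_eq_true] at hm
        have hm' : (kws.any fun k => PySem.Str.isIn k t.2.2) = false := hm
        have hcl : pvClassify ((d, kws) :: rest) t.2.2 = pvClassify rest t.2.2 := by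
          simp only [pvClassify, hm', Bool.false_eq_true, if_false]
        rw [hm, hcl]
        simp
    simp only [pvSieve]
    refine List.cons_eq_cons.mpr ⟨?_, ?_⟩
    · rw [hhead]
    · rw [ih _ hndrest]
      refine List.map_congr_left ?_
      intro q' hq'
      rw [htail q' hq']

-- filter on the mapped pool = mapped filter on the enumeration
theorem pvFilterPool (l : List (Int × String)) (P : Int × String × String → Bool) :
    ((l.map (fun p => (p.1, p.2, PySem.Str.lower p.2))).filter P)
      = (l.filter (fun p => P (p.1, p.2, PySem.Str.lower p.2))).map (fun p => (p.1, p.2, PySem.Str.lower p.2)) := by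
  induction l with
  | nil => rfl
  | cons p l ih =>
    simp only [List.map_cons, List.filter_cons]
    by_cases h : P (p.1, p.2, PySem.Str.lower p.2) = true
    · simp [h, ih]
    · rw [Bool.not_eq_true] at h
      simp [h, ih]

-- ===== VERDICT (by name: the statement is the Claim_ definition above) =====
theorem sample_by_domain_spec : Claim_equal_sample_by_domain := by
  intro documents summaries domain_keywords _
  show sample_by_domain documents summaries domain_keywords = sample_by_domain_alt documents summaries domain_keywords
  simp only [sample_by_domain, sample_by_domain_alt]
  have hnd : (PySem.Dict.ofList domain_keywords).keys.Nodup := PySem.Dict.nodup_keys_ofList domain_keywords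
  have hinitkeys := pvInit_keys (PySem.Dict.ofList domain_keywords) hnd (([], []) : List String × List String)
  have hc : ∀ q ∈ (PySem.Dict.ofList domain_keywords).items,
      ((PySem.Dict.ofList domain_keywords).keys.foldl (fun d domain => d.insert domain (([], []) : List String × List String)) PySem.Dict.empty).contains q.1 = true := by
    intro q hq
    rw [PySem.Dict.contains_iff_mem_keys, hinitkeys]
    exact List.mem_map_of_mem (f := Prod.fst) hq
  have hfkeys := pvFold_keys (PySem.Dict.ofList domain_keywords).items summaries (PySem.List.enumerate documents 0) _ hc
  rw [hinitkeys] at hfkeys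
  have hfnd : ((PySem.List.enumerate documents 0).foldl (fun ds p => pvAInner ds (PySem.Dict.ofList domain_keywords).items p.1 p.2 (PySem.Str.lower p.2) summaries) ((PySem.Dict.ofList domain_keywords).keys.foldl (fun d domain => d.insert domain (([], []) : List String × List String)) PySem.Dict.empty)).keys.Nodup := by
    rw [hfkeys]; exact hnd
  rw [PySem.Dict.items_eq_map_keys _ hfnd ([], [])]
  rw [hfkeys, List.map_map]
  have hkeq : (PySem.Dict.ofList domain_keywords).keys = (PySem.Dict.ofList domain_keywords).items.map Prod.fst := rfl
  have hndfst : ((PySem.Dict.ofList domain_keywords).items.map Prod.fst).Nodup := by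
    rw [← hkeq]; exact hnd
  simp only [pvFold_getD, pvInit_getD _ hnd, List.nil_append]
  rw [pvSieve_eq summaries _ _ hndfst]
  rw [hkeq, List.map_map]
  refine List.map_congr_left ?_
  intro q hq
  simp only [Function.comp, pvFilterPool, List.map_map, List.filter_filter]
  refine Prod.ext rfl (Prod.ext rfl ?_)
  by_cases ht : pvTruthy summaries = true
  · simp only [ht, if_true, Option.some.injEq]
    have hfe : (PySem.List.enumerate documents 0).filter
          (fun p => pvClassify (PySem.Dict.ofList domain_keywords).items (PySem.Str.lower p.2) == some q.1 && pvC summaries p.1)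
        = (PySem.List.enumerate documents 0).filter
          (fun p => decide (p.1 < ((summaries.getD []).length : Int)) && (pvClassify (PySem.Dict.ofList domain_keywords).items (PySem.Str.lower p.2) == some q.1)) := by
      refine List.filter_congr ?_
      intro t _
      simp [pvC, ht, Bool.and_comm]
    rw [hfe]
    rfl
  · rw [Bool.not_eq_true] at ht
    simp only [ht, Bool.false_eq_true, if_false]
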